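-- pv_equiv track=rewrite | github.com/Jr382/UVA-Online-Judge | 11235 - Frequent values/11235.py | group_by_number
-- ===== SOURCE A (Python) =====
-- def group_by_number(numbers):
--     groups = {}
--     for i in range(len(numbers)):
--         key = numbers[i]
--         if key not in groups:
--             groups[key] = [i, 0]
--         groups[key][1] += 1
--
--     return [(groups[i][0], groups[i][1]) for i in groups]
-- ===== SOURCE B (Python) =====
-- def group_by_number(numbers):
--     # Worklist of (index, value) pairs: repeatedly take the first pair, emit its
--     # index with the pair-count of its value, and drop all pairs of that value.
--     pairs = list(enumerate(numbers))
--     result = []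
--     while pairs:
--         i, v = pairs[0]
--         result.append((i, sum(1 for _, x in pairs if x == v)))
--         pairs = [p for p in pairs if p[1] != v]
--     return result
-- ===== Notes on version B (the rewrite author's own statement) =====
-- stated objective: alternative
-- what changed: A builds a dict of mutable [first_index, count] entries in one indexed loop; B uses no dict at all: it keeps a worklist of (index, value) pairs and repeatedly emits the first pair's index with its value's tally, then filters that value out of the worklist.
import Mathlib
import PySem

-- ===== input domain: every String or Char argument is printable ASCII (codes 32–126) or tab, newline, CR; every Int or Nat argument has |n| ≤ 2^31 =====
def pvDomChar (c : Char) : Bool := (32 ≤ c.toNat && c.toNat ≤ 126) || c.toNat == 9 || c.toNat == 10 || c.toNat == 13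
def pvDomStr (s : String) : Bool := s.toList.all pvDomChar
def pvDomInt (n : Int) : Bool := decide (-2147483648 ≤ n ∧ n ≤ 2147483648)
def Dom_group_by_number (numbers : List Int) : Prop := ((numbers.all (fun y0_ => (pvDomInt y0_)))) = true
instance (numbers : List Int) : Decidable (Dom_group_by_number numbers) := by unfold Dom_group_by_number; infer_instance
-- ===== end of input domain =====

-- B drops A's dict entirely: a worklist of (index, value) pairs is repeatedly split into the first value's group (emitted as index + tally) and the filtered remainder; alternative decomposition, same result.


-- ===== PORT A =====
def group_by_number (numbers : List Int) : List (Int × Int) :=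
  let groups : PySem.Dict Int (Int × Int) :=
    (PySem.List.pyRange 0 (PySem.List.len numbers) 1).foldl
      (fun g i =>
        let key := PySem.List.pyGetD numbers i 0
        let g' := if g.contains key then g else g.insert key (i, 0)
        g'.modify key (0, 0) (fun p => (p.1, p.2 + 1)))
      PySem.Dict.empty
  groups.keys.map (fun k => ((groups.getD k (0, 0)).1, (groups.getD k (0, 0)).2))

-- ===== PORT B =====
-- the while loop over the shrinking worklist, as structural recursion (the filter makes the list strictly shorter)
def altLoop : List (Int × Int) → List (Int × Int)
  | [] => []
  | p :: rest =>
      (p.1, ((p :: rest).countP (fun q => q.2 == p.2) : Int)) ::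
        altLoop (rest.filter (fun q => !(q.2 == p.2)))
termination_by ps => ps.length
decreasing_by
  simp only [List.length_unattach, List.length_cons]
  exact Nat.lt_succ_of_le (le_trans (List.length_filter_le _ _) (by simp))

def group_by_number_alt (numbers : List Int) : List (Int × Int) :=
  altLoop (PySem.List.enumerate numbers)

-- ===== PRECONDITION & SPEC =====
def Spec_group_by_number (numbers : List Int) (out : List (Int × Int)) : Prop := out = group_by_number_alt numbers
instance (numbers : List Int) (out : List (Int × Int)) : Decidable (Spec_group_by_number numbers out) := by unfold Spec_group_by_number; infer_instance

-- ===== CLAIM (what is proved, stated in full; the proofs are below) =====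
def Claim_equal_group_by_number : Prop := ∀ (numbers : List Int), Dom_group_by_number numbers → Spec_group_by_number numbers (group_by_number numbers)

-- ===== LEMMAS AND PROOFS =====

-- A-side canonical form: first-appearance-ordered distinct values with first index and count
def canonA (pre : List Int) : List (Int × (Int × Int)) :=
  (PySem.List.dedup pre).map (fun v => (v, ((pre.idxOf v : Int), (pre.count v : Int))))

lemma dedup_append_mem (pre : List Int) (x : Int) (h : x ∈ pre) :
    PySem.List.dedup (pre ++ [x]) = PySem.List.dedup pre := by
  simp [PySem.List.dedup, PySem.Set.ofList, List.foldl_append, PySem.Set.add, PySem.Set.contains]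
  exact (PySem.Set.mem_ofList pre x).mpr h

lemma dedup_append_not_mem (pre : List Int) (x : Int) (h : x ∉ pre) :
    PySem.List.dedup (pre ++ [x]) = PySem.List.dedup pre ++ [x] := by
  simp [PySem.List.dedup, PySem.Set.ofList, List.foldl_append, PySem.Set.add, PySem.Set.contains]
  intro hc
  exact absurd ((PySem.Set.mem_ofList pre x).mp hc) h

lemma contains_canon_iff {ν : Type} (pre : List Int) (f : Int → ν) (x : Int) :
    (PySem.Dict.mk ((PySem.List.dedup pre).map (fun v => (v, f v)))).contains x = true ↔ x ∈ pre := by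
  simp [PySem.Dict.contains, List.any_map, Function.comp, List.any_eq_true]

lemma idx_extend (pre : List Int) (x v : Int) (hv : v ∈ pre) :
    List.idxOf v (pre ++ [x]) = List.idxOf v pre := by
  rw [List.idxOf_append, if_pos hv]

lemma find_self_of_mem (l : List Int) (x : Int) (h : x ∈ l) :
    l.find? (fun v => v == x) = some x := by
  induction l with
  | nil => cases h
  | cons a t ih =>
    by_cases hax : a = x
    · subst hax; simp
    · have hb : (a == x) = false := by simp [hax]
      rw [List.find?_cons, hb]
      exact ih (by cases h with | head => exact absurd rfl hax | tail _ h => exact h)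

lemma get?_canon {ν : Type} (pre : List Int) (f : Int → ν) (x : Int) (h : x ∈ pre) :
    (PySem.Dict.mk ((PySem.List.dedup pre).map (fun v => (v, f v)))).get? x = some (f x) := by
  simp only [PySem.Dict.get?, List.find?_map]
  have : ((fun p : Int × ν => p.1 == x) ∘ fun v => (v, f v)) = (fun v => v == x) := rfl
  rw [this, find_self_of_mem _ x ((PySem.List.mem_dedup pre x).mpr h)]
  rfl

lemma count_extend_ne (pre : List Int) (x v : Int) (hvx : v ≠ x) :
    List.count v (pre ++ [x]) = List.count v pre := by
  simp [List.count_append, Ne.symm hvx]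

def stepA (g : PySem.Dict Int (Int × Int)) (p : Int × Int) : PySem.Dict Int (Int × Int) :=
  let key := p.2
  let g' := if g.contains key then g else g.insert key (p.1, 0)
  g'.modify key (0, 0) (fun q => (q.1, q.2 + 1))

lemma stepA_canon (pre : List Int) (x : Int) :
    stepA (PySem.Dict.mk (canonA pre)) ((pre.length : Int), x) = PySem.Dict.mk (canonA (pre ++ [x])) := by
  show ((if (PySem.Dict.mk (canonA pre)).contains x = true then PySem.Dict.mk (canonA pre)
         else (PySem.Dict.mk (canonA pre)).insert x ((pre.length : Int), 0)).modify x (0,0)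
           (fun q => (q.1, q.2 + 1)))
       = PySem.Dict.mk (canonA (pre ++ [x]))
  unfold canonA
  by_cases h : x ∈ pre
  · rw [if_pos ((contains_canon_iff pre _ x).mpr h)]
    rw [PySem.Dict.modify, PySem.Dict.getD, get?_canon pre _ x h]
    show PySem.Dict.insert _ x ((pre.idxOf x : Int), (pre.count x : Int) + 1) = _
    rw [PySem.Dict.insert, if_pos ((contains_canon_iff pre _ x).mpr h)]
    rw [dedup_append_mem pre x h]
    refine congrArg _ ?_
    rw [List.map_map]
    apply List.map_congr_left
    intro v hv
    by_cases hvx : v = x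
    · subst hvx
      simp [idx_extend pre v v ((PySem.List.mem_dedup pre v).mp hv)]
    · have hb : (v == x) = false := by simp [hvx]
      simp only [Function.comp_apply, hb]
      simp [idx_extend pre x v ((PySem.List.mem_dedup pre v).mp hv), count_extend_ne pre x v hvx]
  · rw [if_neg (by rw [contains_canon_iff pre _ x]; exact h)]
    rw [PySem.Dict.insert, if_neg (by rw [contains_canon_iff pre _ x]; exact h)]
    rw [PySem.Dict.modify, PySem.Dict.getD]
    have hget : (PySem.Dict.mk ((PySem.List.dedup pre).map
        (fun v => (v, ((pre.idxOf v : Int), (pre.count v : Int)))) ++ [(x, ((pre.length : Int), 0))])).get? x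
        = some ((pre.length : Int), 0) := by
      rw [PySem.Dict.get?, List.find?_append]
      have hnone : List.find? (fun p => p.1 == x)
          ((PySem.List.dedup pre).map (fun v => (v, ((pre.idxOf v : Int), (pre.count v : Int))))) = none := by
        rw [List.find?_eq_none]
        intro p hp
        rcases List.mem_map.mp hp with ⟨v, hv, rfl⟩
        simp only [beq_iff_eq]
        intro hvx; exact h (hvx ▸ (PySem.List.mem_dedup pre v).mp hv)
      rw [hnone]
      simp
    rw [hget]
    show PySem.Dict.insert _ x ((pre.length : Int), (0:Int) + 1) = _
    rw [PySem.Dict.insert, if_pos (by simp [PySem.Dict.contains])]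
    rw [dedup_append_not_mem pre x h]
    refine congrArg _ ?_
    rw [List.map_append, List.map_append]
    refine congrArg₂ _ ?_ ?_
    · rw [List.map_map]
      apply List.map_congr_left
      intro v hv
      have hb : (v == x) = false := by
        simp only [beq_eq_false_iff_ne, ne_eq]
        intro hvx; exact h (hvx ▸ (PySem.List.mem_dedup pre v).mp hv)
      simp only [Function.comp_apply, hb]
      simp [idx_extend pre x v ((PySem.List.mem_dedup pre v).mp hv),
            count_extend_ne pre x v (by intro hvx; exact h (hvx ▸ (PySem.List.mem_dedup pre v).mp hv))]
    · simp [List.idxOf_append, h, List.count_eq_zero.mpr h]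

lemma foldA_canon (xs pre : List Int) :
    (PySem.List.enumerate xs (pre.length : Int)).foldl stepA (PySem.Dict.mk (canonA pre))
      = PySem.Dict.mk (canonA (pre ++ xs)) := by
  induction xs generalizing pre with
  | nil => simp [PySem.List.enumerate]
  | cons y ys ih =>
    rw [PySem.List.enumerate_cons, List.foldl_cons, stepA_canon pre y]
    have h1 : ((pre.length : Int) + 1) = ((pre ++ [y]).length : Int) := by simp
    rw [h1, ih (pre ++ [y])]
    simp

lemma portA_eq (numbers : List Int) :
    group_by_number numbers
      = (PySem.List.dedup numbers).map (fun v => ((numbers.idxOf v : Int), (numbers.count v : Int))) := by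
  have h2 := foldA_canon numbers []
  simp only [List.nil_append, List.length_nil, Int.natCast_zero] at h2
  have h3 : (PySem.List.pyRange 0 (PySem.List.len numbers) 1).foldl
      (fun g i =>
        let key := PySem.List.pyGetD numbers i 0
        let g' := if g.contains key then g else g.insert key (i, 0)
        g'.modify key (0, 0) (fun p => (p.1, p.2 + 1)))
      PySem.Dict.empty
    = PySem.Dict.mk (canonA numbers) := by
    rw [← h2, PySem.List.enumerate_eq_map_pyRange numbers 0, List.foldl_map]
    rfl
  have h0 : group_by_number numbers
      = (PySem.Dict.mk (canonA numbers)).keys.map (fun k =>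
          (((PySem.Dict.mk (canonA numbers)).getD k (0, 0)).1,
           ((PySem.Dict.mk (canonA numbers)).getD k (0, 0)).2)) := by
    unfold group_by_number
    rw [h3]
  rw [h0, PySem.Dict.keys]
  unfold canonA
  rw [List.map_map, List.map_map]
  apply List.map_congr_left
  intro v hv
  have hm : v ∈ numbers := (PySem.List.mem_dedup numbers v).mp hv
  simp only [Function.comp_apply]
  rw [PySem.Dict.getD, get?_canon numbers _ v hm]
  rfl

-- B-side: dedup commutes with filtering away one value
lemma dedup_filter_ne (l : List Int) (x : Int) :
    PySem.List.dedup (l.filter (fun y => !(y == x))) = (PySem.List.dedup l).filter (fun y => !(y == x)) := by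
  induction l with
  | nil => rfl
  | cons a t ih =>
    simp only [PySem.List.dedup] at *
    by_cases hax : a = x
    · subst hax
      have hcond : (!(a == a)) = false := by simp
      rw [PySem.Set.ofList_cons, PySem.Set.discard]
      simp only [List.filter_cons, hcond, Bool.false_eq_true, if_false]
      rw [ih, List.filter_filter]
      symm
      apply List.filter_congr
      intro y _
      by_cases h : y = a <;> simp [h]
    · have hcond : (!(a == x)) = true := by simp [hax]
      simp only [List.filter_cons, hcond, if_true]
      rw [PySem.Set.ofList_cons, PySem.Set.ofList_cons, ih]
      simp only [List.filter_cons, hcond, if_true]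
      rw [PySem.Set.discard, PySem.Set.discard, List.filter_comm]

-- find? and countP are unchanged by filtering with a weaker predicate
lemma find?_filter_imp {α : Type} (l : List α) (p q : α → Bool) (h : ∀ a, p a = true → q a = true) :
    (l.filter q).find? p = l.find? p := by
  induction l with
  | nil => rfl
  | cons a t ih =>
    by_cases hp : p a = true
    · rw [List.filter_cons, if_pos (h a hp), List.find?_cons_of_pos hp, List.find?_cons_of_pos hp]
    · have hp' : p a = false := by simpa using hp
      rw [List.find?_cons_of_neg (by simp [hp'])]
      by_cases hq : q a = true
      · rw [List.filter_cons, if_pos hq, List.find?_cons_of_neg (by simp [hp'])]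
        exact ih
      · rw [List.filter_cons, if_neg hq]
        exact ih

lemma countP_filter_imp {α : Type} (l : List α) (p q : α → Bool) (h : ∀ a, p a = true → q a = true) :
    (l.filter q).countP p = l.countP p := by
  induction l with
  | nil => rfl
  | cons a t ih =>
    by_cases hq : q a = true
    · rw [List.filter_cons, if_pos hq, List.countP_cons, List.countP_cons, ih]
    · have hp : p a = false := by
        by_contra hc
        exact hq (h a (by simpa using hc))
      rw [List.filter_cons, if_neg hq, List.countP_cons, hp, ih]
      simp

lemma altLoop_nil : altLoop [] = [] := by rw [altLoop.eq_def]

lemma altLoop_cons (p : Int × Int) (rest : List (Int × Int)) :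
    altLoop (p :: rest) = (p.1, ((p :: rest).countP (fun q => q.2 == p.2) : Int)) ::
        altLoop (rest.filter (fun q => !(q.2 == p.2))) := by rw [altLoop.eq_def]

-- B-side canonical form over an arbitrary worklist of (index, value) pairs
def canonB (ps : List (Int × Int)) : List (Int × Int) :=
  (PySem.List.dedup (ps.map Prod.snd)).map (fun v =>
    (((ps.find? (fun q => q.2 == v)).map Prod.fst).getD 0,
     (ps.countP (fun q => q.2 == v) : Int)))

lemma altLoop_canon (ps : List (Int × Int)) : altLoop ps = canonB ps := by
  induction hn : ps.length using Nat.strong_induction_on generalizing ps with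
  | _ n ih =>
    cases ps with
    | nil => rw [altLoop_nil]; rfl
    | cons p rest =>
      obtain ⟨i, v⟩ := p
      have hlen : (rest.filter (fun q => !(q.2 == v))).length < n := by
        subst hn
        exact Nat.lt_succ_of_le (List.length_filter_le _ _)
      rw [altLoop_cons, ih _ hlen _ rfl]
      unfold canonB
      have hmapf : (rest.filter (fun q => !(q.2 == v))).map Prod.snd
          = (rest.map Prod.snd).filter (fun y => !(y == v)) := by
        exact (List.filter_map (p := fun y => !(y == v)) (f := Prod.snd) (l := rest)).symm
      rw [hmapf, dedup_filter_ne]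
      have hded : PySem.List.dedup (((i, v) :: rest).map Prod.snd)
          = v :: (PySem.List.dedup (rest.map Prod.snd)).filter (fun y => !(y == v)) := by
        simp only [List.map_cons, PySem.List.dedup, PySem.Set.ofList_cons, PySem.Set.discard]
      rw [hded, List.map_cons]
      refine congrArg₂ _ ?_ ?_
      · have hfind : (((i, v) :: rest).find? (fun q => q.2 == v)) = some (i, v) :=
          List.find?_cons_of_pos (by simp)
        rw [hfind]
        rfl
      · apply List.map_congr_left
        intro w hw
        have hwne : (w == v) = false := by
          have := List.of_mem_filter hw
          simpa using this
        have hw' : w ≠ v := by simpa using hwne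
        have himp : ∀ a : Int × Int, (a.2 == w) = true → (!(a.2 == v)) = true := by
          intro a ha
          have : a.2 = w := by simpa using ha
          simp [this, hw']
        rw [find?_filter_imp rest _ _ himp, countP_filter_imp rest _ _ himp]
        have hhead : (((i, v) : Int × Int).2 == w) = false := by
          simp only [beq_eq_false_iff_ne]
          exact Ne.symm hw'
        rw [List.find?_cons_of_neg (by simp [hhead]), List.countP_cons, hhead]
        simp

-- find? / countP over an enumeration
lemma find?_enumerate (numbers : List Int) (s : Int) (v : Int) (h : v ∈ numbers) :
    (PySem.List.enumerate numbers s).find? (fun q => q.2 == v)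
      = some (s + (numbers.idxOf v : Int), v) := by
  induction numbers generalizing s with
  | nil => cases h
  | cons a t ih =>
    rw [PySem.List.enumerate_cons]
    by_cases hav : a = v
    · subst hav
      rw [List.find?_cons_of_pos (by simp)]
      simp [List.idxOf_cons_self]
    · have hb : ((a : Int) == v) = false := by simp [hav]
      rw [List.find?_cons_of_neg (by simp [hav])]
      have hm : v ∈ t := by cases h with | head => exact absurd rfl hav | tail _ h => exact h
      rw [ih (s + 1) hm]
      have : List.idxOf v (a :: t) = List.idxOf v t + 1 := by
        simp [List.idxOf_cons, hb]
      rw [this]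
      push_cast
      ring_nf

lemma countP_enumerate (numbers : List Int) (s : Int) (v : Int) :
    (PySem.List.enumerate numbers s).countP (fun q => q.2 == v) = numbers.count v := by
  induction numbers generalizing s with
  | nil => rfl
  | cons a t ih =>
    rw [PySem.List.enumerate_cons, List.countP_cons, ih (s + 1)]
    simp [List.count_cons, BEq.comm]

lemma portB_eq (numbers : List Int) :
    group_by_number_alt numbers
      = (PySem.List.dedup numbers).map (fun v => ((numbers.idxOf v : Int), (numbers.count v : Int))) := by
  unfold group_by_number_alt
  rw [altLoop_canon]
  unfold canonB
  rw [PySem.List.map_snd_enumerate]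
  apply List.map_congr_left
  intro v hv
  have hm : v ∈ numbers := (PySem.List.mem_dedup numbers v).mp hv
  rw [find?_enumerate numbers 0 v hm, countP_enumerate numbers 0 v]
  simp

-- ===== VERDICT (by name: the statement is the Claim_ definition above) =====
theorem group_by_number_spec : Claim_equal_group_by_number := by
  intro numbers _
  unfold Spec_group_by_number
  rw [portA_eq, portB_eq]
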